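-- pv_equiv track=rewrite | github.com/AdamZhouSE/pythonHomework | Code/CodeRecords/2705/60770/302030.py | isWrong
-- ===== SOURCE A (Python) =====
-- def isWrong(edges,e):
--     n=len(edges)
--     roots=[i for i in range(n+1)]
--     for u,v in edges:
--         if [u,v]==e:
--             continue
--         if isSame(u,v,roots):
--             return [u,v]
--         join(u,v,roots)
--     return []
--
-- def find(u,roots):
--     if u==roots[u]:
--         return u
--     roots[u]=find(roots[u],roots)
--     return roots[u]
--
-- def join(u,v,roots):
--     u,v=find(u,roots),find(v,roots)
--     if u==v:
--         return
--     roots[v]=u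
--
-- def isSame(u,v,roots):
--     u,v=find(u,roots),find(v,roots)
--     return u==v
-- ===== SOURCE B (Python) =====
-- def isWrong(edges, e):
--     comp = {}  # node label -> component representative (quick-find: flat map, eager relabeling)
--     for edge in edges:
--         u, v = edge
--         if [u, v] == e:
--             continue
--         cu = comp.setdefault(u, u)
--         cv = comp.setdefault(v, v)
--         if cu == cv:
--             return [u, v]
--         for k in comp:
--             if comp[k] == cv:
--                 comp[k] = cu
--     return []
-- ===== Notes on version B (the rewrite author's own statement) =====
-- stated objective: simpler
-- what changed: Replaces the recursive parent-forest union-find with path compression (roots array, find/join/isSame helpers) by a single flat node-to-representative dict updated eagerly on each union (quick-find): no recursion, no parent chains, cycle test is one dict comparison.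
-- outside the precondition, e.g. on isWrong([[1, -1]], []): A returns [1, -1], B returns []
import Mathlib
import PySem

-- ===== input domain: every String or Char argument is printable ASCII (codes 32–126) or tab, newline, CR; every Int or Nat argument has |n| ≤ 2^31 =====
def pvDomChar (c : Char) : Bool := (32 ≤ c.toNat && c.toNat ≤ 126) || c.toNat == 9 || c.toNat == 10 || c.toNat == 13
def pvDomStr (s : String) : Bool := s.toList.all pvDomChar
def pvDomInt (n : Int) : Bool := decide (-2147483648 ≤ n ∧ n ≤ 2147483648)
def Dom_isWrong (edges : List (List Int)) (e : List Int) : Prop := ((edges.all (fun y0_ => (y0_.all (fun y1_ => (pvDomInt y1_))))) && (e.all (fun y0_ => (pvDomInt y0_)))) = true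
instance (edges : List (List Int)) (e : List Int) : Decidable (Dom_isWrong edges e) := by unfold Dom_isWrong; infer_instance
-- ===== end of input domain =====

-- B replaces A's recursive union-find (parent array + path compression) by a flat
-- node→representative dict with eager relabeling on union (quick-find): simpler, no recursion.

-- ===== PORT A =====
-- find(u, roots): recursive with path compression; fuel = recursion guard (none = the
-- recursion would not terminate / RecursionError; never reached under Pre_).
def findA (fuel : Nat) (u : Int) (roots : List Int) : Option (Int × List Int) :=
  match fuel with
  | 0 => none
  | f + 1 =>
    match PySem.List.pyGet? roots u with
    | none => none                       -- IndexError
    | some p =>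
      if u = p then some (u, roots)
      else
        match findA f p roots with
        | none => none
        | some (r, roots₁) =>
          match PySem.List.pySet? roots₁ u r with   -- roots[u] = find(roots[u], roots)
          | none => none
          | some roots₂ => some (r, roots₂)         -- return roots[u]

-- isSame(u, v, roots) (threading the mutated roots)
def isSameA (fuel : Nat) (u v : Int) (roots : List Int) : Option (Bool × List Int) :=
  match findA fuel u roots with
  | none => none
  | some (ru, roots₁) =>
    match findA fuel v roots₁ with
    | none => none
    | some (rv, roots₂) => some (decide (ru = rv), roots₂)

-- join(u, v, roots)
def joinA (fuel : Nat) (u v : Int) (roots : List Int) : Option (List Int) :=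
  match findA fuel u roots with
  | none => none
  | some (ru, roots₁) =>
    match findA fuel v roots₁ with
    | none => none
    | some (rv, roots₂) =>
      if ru = rv then some roots₂
      else PySem.List.pySet? roots₂ rv ru           -- roots[v] = u (on the roots)

-- the 'for u,v in edges' loop; none = a Python exception (unpack error / IndexError)
def loopA (e : List Int) (fuel : Nat) : List (List Int) → List Int → Option (List Int)
  | [], _ => some []
  | ed :: rest, roots =>
    match ed with
    | [u, v] =>
      if [u, v] = e then loopA e fuel rest roots
      else
        match isSameA fuel u v roots with
        | none => none
        | some (b, roots₁) =>
          if b then some [u, v]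
          else
            match joinA fuel u v roots₁ with
            | none => none
            | some roots₂ => loopA e fuel rest roots₂
    | _ => none                                      -- 'u,v = ed' raises

def isWrong (edges : List (List Int)) (e : List Int) : List Int :=
  let n := edges.length
  let roots := PySem.List.pyRange 0 ((n : Int) + 1) 1     -- [i for i in range(n+1)]
  ((loopA e (2 * n + 2) edges roots).getD [])             -- none unreachable under Pre_

-- ===== PORT B =====
-- 'for k in comp: if comp[k] == cv: comp[k] = cu'
def relabelB (comp : PySem.Dict Int Int) (cv cu : Int) : PySem.Dict Int Int :=
  comp.keys.foldl (fun d k => if d.getD k k = cv then d.insert k cu else d) comp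

def loopB (e : List Int) : List (List Int) → PySem.Dict Int Int → Option (List Int)
  | [], _ => some []
  | ed :: rest, comp =>
    match ed with
    | [u, v] =>
      if [u, v] = e then loopB e rest comp
      else
        let cu := comp.getD u u                      -- cu = comp.setdefault(u, u)
        let comp₁ := comp.setdefault u u
        let cv := comp₁.getD v v                     -- cv = comp.setdefault(v, v)
        let comp₂ := comp₁.setdefault v v
        if cu = cv then some [u, v]
        else loopB e rest (relabelB comp₂ cv cu)
    | _ => none                                      -- 'u,v = edge' raises

def isWrong_alt (edges : List (List Int)) (e : List Int) : List Int :=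
  (loopB e edges PySem.Dict.empty).getD []

-- ===== PRECONDITION & SPEC =====
-- Pre_ restricts to the function's natural domain: every edge is a pair of node labels
-- in 0..len(edges) (the index range of A's roots array). Outside it A raises
-- (ValueError on unpacking a non-pair, IndexError for labels beyond the array) except on
-- the negative band -len-1..-1, where Python's negative indexing makes A silently treat
-- label -k as node n+1-k — malformed input outside the natural domain (see claim cites).
def Pre_isWrong (edges : List (List Int)) (e : List Int) : Prop :=
  ∀ ed ∈ edges, ed.length = 2 ∧ ∀ x ∈ ed, 0 ≤ x ∧ x ≤ (edges.length : Int)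
instance (edges : List (List Int)) (e : List Int) : Decidable (Pre_isWrong edges e) := by
  unfold Pre_isWrong; infer_instance
def pvWitness_isWrong : List (List Int) × List Int := ([[0, 1], [1, 2], [0, 2]], [5, 5])

def Spec_isWrong (edges : List (List Int)) (e : List Int) (out : List Int) : Prop :=
  out = isWrong_alt edges e
instance (edges : List (List Int)) (e : List Int) (out : List Int) :
    Decidable (Spec_isWrong edges e out) := by unfold Spec_isWrong; infer_instance

-- ===== CLAIM (what is proved, stated in full; the proofs are below) =====
def Claim_equal_isWrong : Prop := ∀ (edges : List (List Int)) (e : List Int),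
  Dom_isWrong edges e → Pre_isWrong edges e → Spec_isWrong edges e (isWrong edges e)

-- ===== LEMMAS AND PROOFS =====

-- pure (ghost) root chase with fuel: the root of u in the parent list 'roots'
def prootF : Nat → List Int → Int → Option Int
  | 0, _, _ => none
  | f + 1, roots, u =>
    match PySem.List.pyGet? roots u with
    | none => none
    | some p => if u = p then some u else prootF f roots p

def rangeOK (L : Nat) (roots : List Int) : Prop :=
  roots.length = L ∧ ∀ p ∈ roots, 0 ≤ p ∧ p < (L : Int)

def classOf (comp : PySem.Dict Int Int) (x : Int) : Int := comp.getD x x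

def Idem (comp : PySem.Dict Int Int) : Prop :=
  ∀ k w, comp.get? k = some w → comp.get? w = some w

theorem pyGet?_pySetD (roots : List Int) (j x : Int) (w : Int)
    (hj0 : 0 ≤ j) (hjL : j < (roots.length : Int)) (hx : 0 ≤ x) :
    PySem.List.pyGet? (PySem.List.pySetD roots j w) x
      = if x = j then some w else PySem.List.pyGet? roots x := by
  rw [PySem.List.pySetD_of_nonneg _ _ hj0, PySem.List.pyGet?_of_nonneg _ hx,
      PySem.List.pyGet?_of_nonneg _ hx]
  by_cases h : x = j
  · subst h
    have h1 : x.toNat < roots.length := by omega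
    simp [h1]
  · have h2 : j.toNat ≠ x.toNat := by omega
    simp [h2, h]

theorem pySet?_eq_some (xs : List Int) (i : Int) (v : Int)
    (h0 : 0 ≤ i) (hL : i < (xs.length : Int)) :
    PySem.List.pySet? xs i v = some (PySem.List.pySetD xs i v) := by
  cases hs : PySem.List.pySet? xs i v with
  | none =>
      have hni := (PySem.List.pySet?_eq_none_iff (xs := xs) (i := i) (v := v)).1 hs
      exact absurd (by unfold PySem.Raise.InRange; omega) hni
  | some ys => simp [PySem.List.pySetD, hs]

theorem prootF_mono : ∀ (f g : Nat) (roots : List Int) (x r : Int),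
    prootF f roots x = some r → f ≤ g → prootF g roots x = some r := by
  intro f
  induction f with
  | zero => intro g roots x r h _; simp [prootF] at h
  | succ f ih =>
    intro g roots x r h hle
    obtain ⟨g', rfl⟩ : ∃ g', g = g' + 1 := ⟨g - 1, by omega⟩
    cases hp : PySem.List.pyGet? roots x with
    | none => simp [prootF, hp] at h
    | some p =>
      simp only [prootF, hp] at h ⊢
      by_cases hxp : x = p
      · rw [if_pos hxp] at h ⊢; exact h
      · rw [if_neg hxp] at h ⊢; exact ih g' roots p r h (by omega)

theorem prootF_unique {f g : Nat} {roots : List Int} {x r s : Int}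
    (hr : prootF f roots x = some r) (hs : prootF g roots x = some s) : r = s := by
  have h1 := prootF_mono f (f + g) roots x r hr (by omega)
  have h2 := prootF_mono g (f + g) roots x s hs (by omega)
  rw [h1] at h2; exact Option.some.inj h2

theorem prootF_root : ∀ (f : Nat) (roots : List Int) (x r : Int),
    prootF f roots x = some r → PySem.List.pyGet? roots r = some r := by
  intro f
  induction f with
  | zero => intro roots x r h; simp [prootF] at h
  | succ f ih =>
    intro roots x r h
    cases hp : PySem.List.pyGet? roots x with
    | none => simp [prootF, hp] at h
    | some p =>
      simp only [prootF, hp] at h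
      by_cases hxp : x = p
      · rw [if_pos hxp] at h
        obtain rfl : x = r := Option.some.inj h
        rw [hp, hxp]
      · rw [if_neg hxp] at h; exact ih roots p r h

theorem root_prootF (f : Nat) (roots : List Int) (r : Int)
    (h : PySem.List.pyGet? roots r = some r) : prootF (f + 1) roots r = some r := by
  simp [prootF, h]

theorem prootF_pos {f : Nat} {roots : List Int} {x r : Int}
    (h : prootF f roots x = some r) : ∃ f', f = f' + 1 := by
  cases f with
  | zero => simp [prootF] at h
  | succ f' => exact ⟨f', rfl⟩

theorem prootF_mem : ∀ (f : Nat) (roots : List Int) (x r : Int),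
    prootF f roots x = some r → r = x ∨ r ∈ roots := by
  intro f
  induction f with
  | zero => intro roots x r h; simp [prootF] at h
  | succ f ih =>
    intro roots x r h
    cases hp : PySem.List.pyGet? roots x with
    | none => simp [prootF, hp] at h
    | some p =>
      simp only [prootF, hp] at h
      by_cases hxp : x = p
      · rw [if_pos hxp] at h; exact Or.inl (Option.some.inj h).symm
      · rw [if_neg hxp] at h
        rcases ih roots p r h with h' | h'
        · exact Or.inr (h' ▸ PySem.List.mem_of_pyGet?_eq_some _ hp)
        · exact Or.inr h'

-- a path-compression write (set j to its own root) preserves every root at the same fuel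
theorem prootF_compress (L : Nat) (roots : List Int) (j r0 : Int)
    (hR : rangeOK L roots) (hj0 : 0 ≤ j) (hjL : j < (L : Int))
    (f0 : Nat) (hpr : prootF f0 roots j = some r0) :
    ∀ (f : Nat) (x r : Int), 0 ≤ x → prootF f roots x = some r →
      prootF f (PySem.List.pySetD roots j r0) x = some r := by
  have hjL' : j < (roots.length : Int) := by rw [hR.1]; exact hjL
  intro f
  induction f with
  | zero => intro x r _ h; simp [prootF] at h
  | succ f ih =>
    intro x r hx h
    cases hp : PySem.List.pyGet? roots x with
    | none => simp [prootF, hp] at h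
    | some p =>
      simp only [prootF, hp] at h
      have hget := pyGet?_pySetD roots j x r0 hj0 hjL' hx
      by_cases hxp : x = p
      · rw [if_pos hxp] at h
        obtain rfl : x = r := Option.some.inj h
        by_cases hxj : x = j
        · have hxr : prootF 1 roots x = some x :=
            root_prootF 0 roots x (by rw [hp, ← hxp])
          have hr0 : r0 = x := prootF_unique (hxj ▸ hpr) hxr
          subst hr0
          rw [if_pos hxj] at hget
          simp [prootF, hget]
        · rw [if_neg hxj] at hget
          rw [hp] at hget
          simp [prootF, hget, ← hxp]
      · rw [if_neg hxp] at h
        have hp0 : 0 ≤ p := (hR.2 p (PySem.List.mem_of_pyGet?_eq_some _ hp)).1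
        have hres := ih p r hp0 h
        by_cases hxj : x = j
        · -- x's parent is rewritten to r0, which equals x's root r
          have h1 : prootF (f + 1) roots x = some r := by
            simp only [prootF, hp]; rw [if_neg hxp]; exact h
          have hr0r : r0 = r := prootF_unique (hxj ▸ hpr) h1
          rw [hr0r] at hget ⊢
          rw [if_pos hxj] at hget
          have hroot : PySem.List.pyGet? roots r = some r := prootF_root f roots p r h
          have hrx : r ≠ x := by
            intro hcon
            rw [hcon] at hroot
            rw [hroot] at hp
            exact hxp (Option.some.inj hp)
          have hroot' : PySem.List.pyGet? (PySem.List.pySetD roots j r) r = some r := by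
            have hr0' : 0 ≤ r := by
              rcases prootF_mem f roots p r h with h' | h'
              · omega
              · exact (hR.2 r h').1
            rw [pyGet?_pySetD roots j r r hj0 hjL' hr0']
            rw [if_neg (by rw [← hxj]; exact hrx)]
            exact hroot
          obtain ⟨f', rfl⟩ := prootF_pos h
          simp only [prootF, hget]
          rw [if_neg (Ne.symm hrx)]
          exact root_prootF f' _ r hroot'
        · rw [if_neg hxj] at hget
          simp only [prootF, hget, hp]
          rw [if_neg hxp]
          exact hres

-- linking root rv below root ru shifts every class of rv to ru, at fuel + 1
theorem prootF_join (L : Nat) (roots : List Int) (ru rv : Int)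
    (hR : rangeOK L roots) (hrv0 : 0 ≤ rv) (hrvL : rv < (L : Int))
    (hru : PySem.List.pyGet? roots ru = some ru)
    (hrvr : PySem.List.pyGet? roots rv = some rv) (hne : ru ≠ rv) :
    ∀ (f : Nat) (x r : Int), 0 ≤ x → prootF f roots x = some r →
      prootF (f + 1) (PySem.List.pySetD roots rv ru) x
        = some (if r = rv then ru else r) := by
  have hrvL' : rv < (roots.length : Int) := by rw [hR.1]; exact hrvL
  intro f
  induction f with
  | zero => intro x r _ h; simp [prootF] at h
  | succ f ih =>
    intro x r hx h
    cases hp : PySem.List.pyGet? roots x with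
    | none => simp [prootF, hp] at h
    | some p =>
      simp only [prootF, hp] at h
      have hget := pyGet?_pySetD roots rv x ru hrv0 hrvL' hx
      by_cases hxp : x = p
      · rw [if_pos hxp] at h
        obtain rfl : x = r := Option.some.inj h
        by_cases hxrv : x = rv
        · rw [if_pos hxrv] at hget
          have hruroot : PySem.List.pyGet? (PySem.List.pySetD roots rv ru) ru = some ru := by
            have hru0 : 0 ≤ ru := by
              have := PySem.List.mem_of_pyGet?_eq_some _ hru
              exact (hR.2 ru this).1
            rw [pyGet?_pySetD roots rv ru ru hrv0 hrvL' hru0, if_neg hne]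
            exact hru
          rw [if_pos hxrv]
          simp only [prootF, hget]
          rw [if_neg (by rw [hxrv]; exact Ne.symm hne)]
          exact root_prootF f _ ru hruroot
        · rw [if_neg hxrv] at hget
          rw [hp] at hget
          rw [if_neg hxrv]
          simp [prootF, hget, ← hxp]
      · rw [if_neg hxp] at h
        have hp0 : 0 ≤ p := (hR.2 p (PySem.List.mem_of_pyGet?_eq_some _ hp)).1
        have hres := ih p r hp0 h
        have hxrv : x ≠ rv := by
          intro hcon
          rw [hcon] at hp
          rw [hrvr] at hp
          exact hxp (hcon.trans (Option.some.inj hp))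
        rw [if_neg hxrv] at hget
        simp only [prootF, hget, hp]
        rw [if_neg hxp]
        exact hres

theorem findA_spec (L : Nat) : ∀ (f g : Nat) (u : Int) (roots : List Int) (r : Int),
    prootF f roots u = some r → f ≤ g → rangeOK L roots → 0 ≤ u → u < (L : Int) →
    ∃ roots', findA g u roots = some (r, roots') ∧ rangeOK L roots' ∧
      (∀ (h : Nat) (x s : Int), 0 ≤ x → prootF h roots x = some s →
        prootF h roots' x = some s) := by
  intro f
  induction f with
  | zero => intro g u roots r h; simp [prootF] at h
  | succ f ih =>
    intro g u roots r h hle hR hu0 huL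
    obtain ⟨g', rfl⟩ : ∃ g', g = g' + 1 := ⟨g - 1, by omega⟩
    cases hp : PySem.List.pyGet? roots u with
    | none => simp [prootF, hp] at h
    | some p =>
      simp only [prootF, hp] at h
      by_cases hup : u = p
      · rw [if_pos hup] at h
        obtain rfl : u = r := Option.some.inj h
        subst hup
        refine ⟨roots, ?_, hR, fun h x s _ hx => hx⟩
        simp [findA, hp]
      · rw [if_neg hup] at h
        have hpmem := PySem.List.mem_of_pyGet?_eq_some _ hp
        have hp0 : 0 ≤ p := (hR.2 p hpmem).1
        have hpL : p < (L : Int) := (hR.2 p hpmem).2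
        obtain ⟨roots₁, hfind₁, hR₁, hpres₁⟩ := ih g' p roots r h (by omega) hR hp0 hpL
        have huL₁ : u < (roots₁.length : Int) := by rw [hR₁.1]; exact huL
        have hset := pySet?_eq_some roots₁ u r hu0 huL₁
        have hprs : prootF (f + 1) roots₁ u = some r := by
          refine hpres₁ (f + 1) u r hu0 ?_
          simp only [prootF, hp]; rw [if_neg hup]; exact h
        have hcomp := prootF_compress L roots₁ u r hR₁ hu0 huL (f + 1) hprs
        refine ⟨PySem.List.pySetD roots₁ u r, ?_, ?_, ?_⟩
        · simp [findA, hp, hup, hfind₁, hset]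
        · constructor
          · rw [PySem.List.pySetD_of_nonneg _ _ hu0]
            rw [List.length_set]
            exact hR₁.1
          · intro q hq
            rw [PySem.List.pySetD_of_nonneg _ _ hu0] at hq
            rcases List.mem_or_eq_of_mem_set hq with h' | h'
            · exact hR₁.2 q h'
            · subst h'
              rcases prootF_mem f roots p q h with h'' | h''
              · constructor <;> omega
              · exact hR.2 q h''
        · intro h' x s hx hxs
          exact hcomp h' x s hx (hpres₁ h' x s hx hxs)

-- ===== B-side lemmas =====

theorem getD_setdefault_diag (d : PySem.Dict Int Int) (a x : Int) :
    (d.setdefault a a).getD x x = d.getD x x := by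
  by_cases hc : d.contains a = true
  · rw [PySem.Dict.setdefault_of_contains _ _ hc]
  · rw [PySem.Dict.setdefault_of_not_contains _ _ (by simpa using hc)]
    rw [PySem.Dict.getD_insert]
    by_cases hxa : x = a
    · subst hxa
      rw [if_pos rfl, PySem.Dict.getD_of_not_contains _ _ (by simpa using hc)]
    · rw [if_neg hxa]

theorem Idem_setdefault (d : PySem.Dict Int Int) (a : Int) (hI : Idem d) :
    Idem (d.setdefault a a) := by
  by_cases hc : d.contains a = true
  · rw [PySem.Dict.setdefault_of_contains _ _ hc]; exact hI
  · rw [PySem.Dict.setdefault_of_not_contains _ _ (by simpa using hc)]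
    intro k w hk
    rw [PySem.Dict.get?_insert] at hk
    by_cases hka : k = a
    · rw [if_pos hka] at hk
      obtain rfl : a = w := Option.some.inj hk
      exact PySem.Dict.get?_insert_self d a a
    · rw [if_neg hka] at hk
      have hw := hI k w hk
      have hwa : w ≠ a := by
        intro hcon
        rw [hcon] at hw
        rw [PySem.Dict.contains_eq_isSome_get?, hw] at hc
        simp at hc
      rw [PySem.Dict.get?_insert, if_neg hwa]
      exact hw

theorem nodup_setdefault (d : PySem.Dict Int Int) (a : Int) (h : d.keys.Nodup) :
    (d.setdefault a a).keys.Nodup := by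
  by_cases hc : d.contains a = true
  · rw [PySem.Dict.setdefault_of_contains _ _ hc]; exact h
  · rw [PySem.Dict.setdefault_of_not_contains _ _ (by simpa using hc)]
    exact PySem.Dict.nodup_keys_insert _ _ _ h

theorem relabel_fold_get? (cv cu : Int) :
    ∀ (ks : List Int) (d : PySem.Dict Int Int), ks.Nodup →
    ∀ x, (ks.foldl (fun d k => if d.getD k k = cv then d.insert k cu else d) d).get? x
      = if x ∈ ks ∧ d.getD x x = cv then some cu else d.get? x := by
  intro ks
  induction ks with
  | nil => intro d _ x; simp
  | cons k ks ih =>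
    intro d hnd x
    have hknotin : k ∉ ks := (List.nodup_cons.1 hnd).1
    have hndtail : ks.Nodup := (List.nodup_cons.1 hnd).2
    simp only [List.foldl_cons]
    rw [ih _ hndtail x]
    by_cases hmem : x ∈ ks
    · have hxk : x ≠ k := fun hcon => hknotin (hcon ▸ hmem)
      have hgd : (if d.getD k k = cv then d.insert k cu else d).getD x x = d.getD x x := by
        split
        · rw [PySem.Dict.getD_insert, if_neg hxk]
        · rfl
      have hg : (if d.getD k k = cv then d.insert k cu else d).get? x = d.get? x := by
        split
        · rw [PySem.Dict.get?_insert, if_neg hxk]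
        · rfl
      rw [hgd, hg]
      by_cases hcv : d.getD x x = cv
      · rw [if_pos ⟨hmem, hcv⟩, if_pos ⟨List.mem_cons_of_mem _ hmem, hcv⟩]
      · rw [if_neg (fun hc => hcv hc.2), if_neg (fun hc => hcv hc.2)]
    · rw [if_neg (fun hc => hmem hc.1)]
      by_cases hxk : x = k
      · subst hxk
        by_cases hcv : d.getD x x = cv
        · rw [if_pos hcv, if_pos ⟨List.mem_cons_self, hcv⟩]
          exact PySem.Dict.get?_insert_self d x cu
        · rw [if_neg hcv, if_neg ?_]
          intro hc
          exact hcv hc.2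
      · have hg : (if d.getD k k = cv then d.insert k cu else d).get? x = d.get? x := by
          split
          · rw [PySem.Dict.get?_insert, if_neg hxk]
          · rfl
        rw [hg, if_neg ?_]
        intro hc
        rcases List.mem_cons.1 hc.1 with h' | h'
        · exact hxk h'
        · exact hmem h'

theorem relabel_get? (comp : PySem.Dict Int Int) (cv cu : Int) (hnd : comp.keys.Nodup) (x : Int) :
    (relabelB comp cv cu).get? x
      = if x ∈ comp.keys ∧ comp.getD x x = cv then some cu else comp.get? x :=
  relabel_fold_get? cv cu comp.keys comp hnd x

theorem classOf_relabel (comp : PySem.Dict Int Int) (cv cu : Int)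
    (hnd : comp.keys.Nodup) (hcv : comp.get? cv = some cv) (x : Int) :
    classOf (relabelB comp cv cu) x
      = if classOf comp x = cv then cu else classOf comp x := by
  unfold classOf
  rw [PySem.Dict.getD_eq_get?_getD, relabel_get? comp cv cu hnd x]
  by_cases hmem : x ∈ comp.keys
  · by_cases hcvx : comp.getD x x = cv
    · rw [if_pos ⟨hmem, hcvx⟩, if_pos hcvx]; rfl
    · rw [if_neg (fun hc => hcvx hc.2), if_neg hcvx, ← PySem.Dict.getD_eq_get?_getD]
  · have hnc : comp.get? x = none := by
      rw [PySem.Dict.get?_eq_none_iff_not_mem_keys]; exact hmem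
    have hgd : comp.getD x x = x := by
      rw [PySem.Dict.getD_eq_get?_getD, hnc]; rfl
    have hxcv : x ≠ cv := by
      intro hcon
      rw [hcon, hcv] at hnc
      cases hnc
    rw [if_neg (fun hc => hmem hc.1), hnc, hgd, if_neg hxcv]
    rfl

theorem Idem_relabel (comp : PySem.Dict Int Int) (cv cu : Int)
    (hnd : comp.keys.Nodup) (hI : Idem comp) (hcu : comp.get? cu = some cu)
    (hne : cu ≠ cv) : Idem (relabelB comp cv cu) := by
  intro k w hk
  rw [relabel_get? comp cv cu hnd] at hk ⊢
  by_cases hc : k ∈ comp.keys ∧ comp.getD k k = cv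
  · rw [if_pos hc] at hk
    obtain rfl : cu = w := Option.some.inj hk
    have hgd : comp.getD cu cu = cu := by
      rw [PySem.Dict.getD_eq_get?_getD, hcu]; rfl
    rw [if_neg (by rw [hgd]; exact fun hc' => hne hc'.2)]
    exact hcu
  · rw [if_neg hc] at hk
    have hw := hI k w hk
    have hgdw : comp.getD w w = w := by
      rw [PySem.Dict.getD_eq_get?_getD, hw]; rfl
    have hgdk : comp.getD k k = w := by
      rw [PySem.Dict.getD_eq_get?_getD, hk]; rfl
    have hmemk : k ∈ comp.keys := by
      by_contra hcon
      rw [(PySem.Dict.get?_eq_none_iff_not_mem_keys comp k).2 hcon] at hk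
      cases hk
    have hwcv : w ≠ cv := by
      intro hcon
      exact hc ⟨hmemk, by rw [hgdk, hcon]⟩
    rw [if_neg (by rw [hgdw]; exact fun hc' => hwcv hc'.2)]
    exact hw

theorem relabel_keys (cv cu : Int) :
    ∀ (ks : List Int) (d : PySem.Dict Int Int), (∀ k ∈ ks, d.contains k = true) →
    (ks.foldl (fun d k => if d.getD k k = cv then d.insert k cu else d) d).keys = d.keys := by
  intro ks
  induction ks with
  | nil => intro d _; rfl
  | cons k ks ih =>
    intro d hall
    simp only [List.foldl_cons]
    have hck : d.contains k = true := hall k List.mem_cons_self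
    have hkeys : (if d.getD k k = cv then d.insert k cu else d).keys = d.keys := by
      split
      · exact PySem.Dict.keys_insert_of_contains _ _ hck
      · rfl
    have hcall : ∀ k' ∈ ks, (if d.getD k k = cv then d.insert k cu else d).contains k' = true := by
      intro k' hk'
      split
      · rw [PySem.Dict.contains_insert]
        simp [hall k' (List.mem_cons_of_mem _ hk')]
      · exact hall k' (List.mem_cons_of_mem _ hk')
    rw [ih _ hcall, hkeys]

theorem relabelB_keys (comp : PySem.Dict Int Int) (cv cu : Int) :
    (relabelB comp cv cu).keys = comp.keys := by
  unfold relabelB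
  exact relabel_keys cv cu comp.keys comp
    (fun k hk => by rw [PySem.Dict.contains_eq_decide_mem_keys]; simp [hk])

-- ===== main loop equivalence =====

theorem loop_eq (n : Nat) (e : List Int) :
    ∀ (rest : List (List Int)) (roots : List Int) (comp : PySem.Dict Int Int) (F : Nat),
    (∀ ed ∈ rest, ed.length = 2 ∧ ∀ x ∈ ed, 0 ≤ x ∧ x ≤ (n : Int)) →
    F + rest.length ≤ 2 * n + 2 →
    rangeOK (n + 1) roots →
    (∀ x : Int, 0 ≤ x → x < ((n + 1 : Nat) : Int) → prootF F roots x = some (classOf comp x)) →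
    Idem comp → comp.keys.Nodup →
    loopA e (2 * n + 2) rest roots = loopB e rest comp := by
  intro rest
  induction rest with
  | nil => intro roots comp F _ _ _ _ _ _; rfl
  | cons ed rest ih =>
    intro roots comp F hed hfuel hR hinv hI hnd
    obtain ⟨hlen2, hbound⟩ := hed ed List.mem_cons_self
    obtain ⟨u, v, rfl⟩ := List.length_eq_two.1 hlen2
    have hedrest : ∀ ed' ∈ rest, ed'.length = 2 ∧ ∀ x ∈ ed', 0 ≤ x ∧ x ≤ (n : Int) :=
      fun ed' h' => hed ed' (List.mem_cons_of_mem _ h')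
    have hu0 : 0 ≤ u := (hbound u (by simp)).1
    have huL : u < ((n + 1 : Nat) : Int) := by
      have := (hbound u (by simp)).2; push_cast; omega
    have hv0 : 0 ≤ v := (hbound v (by simp)).1
    have hvL : v < ((n + 1 : Nat) : Int) := by
      have := (hbound v (by simp)).2; push_cast; omega
    by_cases hskip : [u, v] = e
    · simp only [loopA, loopB, if_pos hskip]
      exact ih roots comp F hedrest (by simp only [List.length_cons] at hfuel; omega) hR hinv hI hnd
    · -- the edge is processed
      have hu := hinv u hu0 huL
      unfold classOf at hu
      set cu := comp.getD u u with hcu_def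
      set cv := comp.getD v v with hcv_def
      have hFle : F ≤ 2 * n + 2 := by simp only [List.length_cons] at hfuel; omega
      obtain ⟨roots₁, hfa₁, hR₁, hpres₁⟩ :=
        findA_spec (n + 1) F (2 * n + 2) u roots cu hu hFle hR hu0 huL
      have hv : prootF F roots v = some cv := by
        have := hinv v hv0 hvL
        unfold classOf at this
        exact this
      have hv₁ : prootF F roots₁ v = some cv := hpres₁ F v cv hv0 hv
      obtain ⟨roots₂, hfa₂, hR₂, hpres₂⟩ :=
        findA_spec (n + 1) F (2 * n + 2) v roots₁ cv hv₁ hFle hR₁ hv0 hvL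
      have hsame : isSameA (2 * n + 2) u v roots = some (decide (cu = cv), roots₂) := by
        simp [isSameA, hfa₁, hfa₂]
      -- B-side class values coincide
      have hBcv : (comp.setdefault u u).getD v v = cv := by
        rw [getD_setdefault_diag]
      by_cases heq : cu = cv
      · simp only [loopA, loopB, if_neg hskip, hsame]
        rw [if_pos (by exact decide_eq_true heq)]
        rw [hBcv]
        rw [if_pos heq]
      · -- join / relabel
        simp only [loopA, loopB, if_neg hskip, hsame]
        rw [if_neg (by simp [heq])]
        rw [hBcv]
        rw [if_neg heq]
        -- A side: joinA
        have hu₂ : prootF F roots₂ u = some cu := hpres₂ F u cu hu0 (hpres₁ F u cu hu0 hu)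
        obtain ⟨roots₃, hfa₃, hR₃, hpres₃⟩ :=
          findA_spec (n + 1) F (2 * n + 2) u roots₂ cu hu₂ hFle hR₂ hu0 huL
        have hv₃ : prootF F roots₃ v = some cv :=
          hpres₃ F v cv hv0 (hpres₂ F v cv hv0 hv₁)
        obtain ⟨roots₄, hfa₄, hR₄, hpres₄⟩ :=
          findA_spec (n + 1) F (2 * n + 2) v roots₃ cv hv₃ hFle hR₃ hv0 hvL
        -- bounds for the two roots
        have hcub : 0 ≤ cu ∧ cu < ((n + 1 : Nat) : Int) := by
          rcases prootF_mem F roots u cu hu with h' | h'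
          · constructor <;> omega
          · exact hR.2 cu h'
        have hcvb : 0 ≤ cv ∧ cv < ((n + 1 : Nat) : Int) := by
          rcases prootF_mem F roots v cv hv with h' | h'
          · constructor <;> omega
          · exact hR.2 cv h'
        -- cu and cv are roots of roots₄
        have hroot_cu : PySem.List.pyGet? roots₄ cu = some cu := by
          have h0 : PySem.List.pyGet? roots cu = some cu := prootF_root F roots u cu hu
          have h1 : prootF 1 roots cu = some cu := root_prootF 0 roots cu h0
          have h4 : prootF 1 roots₄ cu = some cu :=
            hpres₄ 1 cu cu hcub.1 (hpres₃ 1 cu cu hcub.1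
              (hpres₂ 1 cu cu hcub.1 (hpres₁ 1 cu cu hcub.1 h1)))
          exact prootF_root 1 roots₄ cu cu h4
        have hroot_cv : PySem.List.pyGet? roots₄ cv = some cv := by
          have h0 : PySem.List.pyGet? roots cv = some cv := prootF_root F roots v cv hv
          have h1 : prootF 1 roots cv = some cv := root_prootF 0 roots cv h0
          have h4 : prootF 1 roots₄ cv = some cv :=
            hpres₄ 1 cv cv hcvb.1 (hpres₃ 1 cv cv hcvb.1
              (hpres₂ 1 cv cv hcvb.1 (hpres₁ 1 cv cv hcvb.1 h1)))
          exact prootF_root 1 roots₄ cv cv h4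
        have hcvL₄ : cv < (roots₄.length : Int) := by rw [hR₄.1]; exact hcvb.2
        have hset := pySet?_eq_some roots₄ cv cu hcvb.1 hcvL₄
        have hjoin : joinA (2 * n + 2) u v roots₂
            = some (PySem.List.pySetD roots₄ cv cu) := by
          simp [joinA, hfa₃, hfa₄, heq, hset]
        rw [hjoin]
        -- new states
        set roots₅ := PySem.List.pySetD roots₄ cv cu with hroots₅
        set comp₂ := (comp.setdefault u u).setdefault v v with hcomp₂
        -- comp₂ has the same classes as comp
        have hclass₂ : ∀ x, classOf comp₂ x = classOf comp x := by
          intro x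
          unfold classOf
          rw [hcomp₂, getD_setdefault_diag, getD_setdefault_diag]
        have hI₂ : Idem comp₂ := Idem_setdefault _ v (Idem_setdefault _ u hI)
        have hnd₂ : comp₂.keys.Nodup := nodup_setdefault _ v (nodup_setdefault _ u hnd)
        -- cv is a key of comp₂ with value cv
        have hcv_key : comp₂.get? cv = some cv := by
          have hcont : comp₂.contains v = true := by
            rw [hcomp₂, PySem.Dict.contains_setdefault]
            simp
          have hex : ∃ w, comp₂.get? v = some w := by
            rw [PySem.Dict.contains_eq_isSome_get?] at hcont
            exact Option.isSome_iff_exists.1 hcont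
          obtain ⟨w, hw⟩ := hex
          have hwcv : w = cv := by
            have h2 : classOf comp₂ v = w := by
              unfold classOf
              rw [PySem.Dict.getD_eq_get?_getD, hw]
              rfl
            rw [hclass₂ v] at h2
            unfold classOf at h2
            rw [← hcv_def] at h2
            exact h2.symm
          rw [← hwcv]
          exact hI₂ v w hw
        have hcu_key : comp₂.get? cu = some cu := by
          have hcont : comp₂.contains u = true := by
            rw [hcomp₂, PySem.Dict.contains_setdefault]
            by_cases hvu : u = v
            · simp [hvu]
            · rw [PySem.Dict.contains_setdefault]
              simp
          have hex : ∃ w, comp₂.get? u = some w := by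
            rw [PySem.Dict.contains_eq_isSome_get?] at hcont
            exact Option.isSome_iff_exists.1 hcont
          obtain ⟨w, hw⟩ := hex
          have hwcu : w = cu := by
            have h2 : classOf comp₂ u = w := by
              unfold classOf
              rw [PySem.Dict.getD_eq_get?_getD, hw]
              rfl
            rw [hclass₂ u] at h2
            unfold classOf at h2
            rw [← hcu_def] at h2
            exact h2.symm
          rw [← hwcu]
          exact hI₂ u w hw
        -- invariants for the recursive call
        have hR₅ : rangeOK (n + 1) roots₅ := by
          constructor
          · rw [hroots₅, PySem.List.pySetD_of_nonneg _ _ hcvb.1, List.length_set]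
            exact hR₄.1
          · intro q hq
            rw [hroots₅, PySem.List.pySetD_of_nonneg _ _ hcvb.1] at hq
            rcases List.mem_or_eq_of_mem_set hq with h' | h'
            · exact hR₄.2 q h'
            · subst h'; exact hcub
        have hinv₅ : ∀ x : Int, 0 ≤ x → x < ((n + 1 : Nat) : Int) →
            prootF (F + 1) roots₅ x = some (classOf (relabelB comp₂ cv cu) x) := by
          intro x hx0 hxL
          have hx₄ : prootF F roots₄ x = some (classOf comp x) :=
            hpres₄ F x _ hx0 (hpres₃ F x _ hx0 (hpres₂ F x _ hx0
              (hpres₁ F x _ hx0 (hinv x hx0 hxL))))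
          have := prootF_join (n + 1) roots₄ cu cv hR₄ hcvb.1 hcvb.2
            hroot_cu hroot_cv heq F x (classOf comp x) hx0 hx₄
          rw [classOf_relabel comp₂ cv cu hnd₂ hcv_key x, hclass₂ x]
          exact this
        have hI₅ : Idem (relabelB comp₂ cv cu) :=
          Idem_relabel comp₂ cv cu hnd₂ hI₂ hcu_key heq
        have hnd₅ : (relabelB comp₂ cv cu).keys.Nodup := by
          rw [relabelB_keys]; exact hnd₂
        exact ih roots₅ (relabelB comp₂ cv cu) (F + 1) hedrest
          (by simp only [List.length_cons] at hfuel ⊢; omega) hR₅ hinv₅ hI₅ hnd₅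

-- ===== VERDICT (by name: the statement is the Claim_ definition above) =====
theorem isWrong_spec : Claim_equal_isWrong := by
  intro edges e _ hpre
  unfold Spec_isWrong isWrong isWrong_alt
  set n := edges.length with hn
  set roots0 := PySem.List.pyRange 0 ((n : Int) + 1) 1 with hroots0
  have hR0 : rangeOK (n + 1) roots0 := by
    constructor
    · rw [hroots0, PySem.List.length_pyRange_one]; omega
    · intro p hp
      rw [hroots0, PySem.List.mem_pyRange_one] at hp
      constructor
      · exact hp.1
      · push_cast; omega
  have hinv0 : ∀ x : Int, 0 ≤ x → x < ((n + 1 : Nat) : Int) →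
      prootF 1 roots0 x = some (classOf PySem.Dict.empty x) := by
    intro x hx0 hxL
    have hget : PySem.List.pyGet? roots0 x = some x := by
      rw [hroots0, PySem.List.pyGet?_of_nonneg _ hx0, PySem.List.pyRange_one]
      have hlt : x.toNat < ((0 : Int) + 1 + (n : Int) - 1).toNat + 1 := by push_cast at hxL ⊢; omega
      have : x.toNat < (((n : Int) + 1) - 0).toNat := by push_cast at hxL ⊢; omega
      rw [List.getElem?_map]
      rw [List.getElem?_range this]
      simp; omega
    have hcl : classOf PySem.Dict.empty x = x := by
      unfold classOf
      rw [PySem.Dict.getD_eq_get?_getD, PySem.Dict.get?_empty]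
      rfl
    rw [hcl]
    simp [prootF, hget]
  have hle := loop_eq n e edges roots0 PySem.Dict.empty 1 hpre (by omega) hR0 hinv0
    (fun k w hk => by rw [PySem.Dict.get?_empty] at hk; cases hk)
    (by simp [PySem.Dict.keys_empty])
  show (loopA e (2 * n + 2) edges roots0).getD [] = (loopB e edges PySem.Dict.empty).getD []
  rw [hle]
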